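-- pv_equiv track=rewrite | github.com/LenchikTs/client | Events/Utils.py | getWorstPayStatus
-- ===== SOURCE A (Python) =====
-- class CPayStatus:
--     initial    = 0 # ни выставления, ни оплаты, ни отказа
--     exposed    = 1 # выставлено, но не оплачено и не отказано
--     refused    = 2 # отказано
--     payed      = 3 # оплачено
--
--     names      = (u'-', u'выставлено', u'отказано', u'оплачено')
--
--     exposedBits = 0x55555555
--     refusedBits = 0xAAAAAAAA
--     payedBits   = 0xFFFFFFFF
--
-- def getWorstPayStatus(payStatus):
--     statusSet = set([CPayStatus.initial])
--     while payStatus>0: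
--         status = payStatus & 0x3
--         statusSet.add(status)
--         payStatus = payStatus >> 2
--     for status in (CPayStatus.exposed, CPayStatus.payed, CPayStatus.refused, CPayStatus.initial):
--         if status in statusSet:
--             return status
-- ===== SOURCE B (Python) =====
-- # Single-pass rewrite: thread a running worst status (priority exposed < payed < refused < initial)
-- # instead of collecting a set and scanning a priority tuple.
--
-- _RANK = {1: 0, 3: 1, 2: 2, 0: 3}  # exposed, payed, refused, initial
--
-- def getWorstPayStatus(payStatus):
--     best = 0  # CPayStatus.initial
--     while payStatus > 0:
--         status = payStatus & 0x3
--         if _RANK[status] < _RANK[best]: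
--             best = status
--         payStatus = payStatus >> 2
--     return best
-- ===== Notes on version B (the rewrite author's own statement) =====
-- stated objective: simpler
-- what changed: Replaces the set-accumulation loop plus priority-tuple scan with a single loop that threads a running best status under the rank exposed < payed < refused < initial.
import Mathlib
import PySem

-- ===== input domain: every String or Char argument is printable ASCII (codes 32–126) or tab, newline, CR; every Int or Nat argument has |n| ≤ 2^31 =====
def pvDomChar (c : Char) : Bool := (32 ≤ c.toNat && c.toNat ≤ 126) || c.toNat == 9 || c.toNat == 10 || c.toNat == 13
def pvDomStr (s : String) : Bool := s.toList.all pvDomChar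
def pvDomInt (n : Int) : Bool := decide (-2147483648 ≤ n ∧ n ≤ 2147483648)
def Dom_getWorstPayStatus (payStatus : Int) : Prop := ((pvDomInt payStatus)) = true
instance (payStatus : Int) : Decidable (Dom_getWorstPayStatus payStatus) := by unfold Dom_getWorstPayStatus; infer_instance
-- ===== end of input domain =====

-- B replaces A's collect-into-a-set-then-priority-scan with a single loop threading a running
-- best status (objective: simpler; same return value everywhere, A is total).

-- ===== PORT A =====
-- termination helper for the 'while payStatus > 0: payStatus >>= 2' loops of both ports
theorem pvShift2_lt (p : Int) (h : 0 < p) : (p >>> (2:Nat)).toNat < p.toNat := by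
  have e : p >>> (2:Nat) = p / 4 := by simp [Int.shiftRight_eq_div_pow]
  rw [e]; omega

-- the 'while payStatus>0' loop of A: add each 2-bit group to statusSet
def pvCollect (payStatus : Int) (statusSet : PySem.Set Int) : PySem.Set Int :=
  if h : payStatus > 0 then
    pvCollect (payStatus >>> (2:Nat)) (statusSet.add (PySem.Int.band payStatus 3))
  else statusSet
termination_by payStatus.toNat
decreasing_by exact pvShift2_lt _ h

-- A's final 'for status in (exposed, payed, refused, initial)' scan; the trailing 0 is the
-- fall-off-the-end case of the Python for-loop, unreachable because initial=0 is always in the set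
def pvPick (statusSet : PySem.Set Int) : Int :=
  if statusSet.contains 1 then 1
  else if statusSet.contains 3 then 3
  else if statusSet.contains 2 then 2
  else if statusSet.contains 0 then 0
  else 0

def getWorstPayStatus (payStatus : Int) : Int :=
  pvPick (pvCollect payStatus (PySem.Set.ofList [0]))

-- ===== PORT B =====
-- rank: priority order exposed(1) < payed(3) < refused(2) < initial(0)
def pvRank (s : Int) : Int :=
  if s = 1 then 0 else if s = 3 then 1 else if s = 2 then 2 else 3

-- B's single while-loop threading 'best'
def pvLoopB (payStatus best : Int) : Int :=
  if h : payStatus > 0 then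
    let status := PySem.Int.band payStatus 3
    pvLoopB (payStatus >>> (2:Nat)) (if pvRank status < pvRank best then status else best)
  else best
termination_by payStatus.toNat
decreasing_by exact pvShift2_lt _ h

def getWorstPayStatus_alt (payStatus : Int) : Int := pvLoopB payStatus 0

-- ===== PRECONDITION & SPEC =====
def Spec_getWorstPayStatus (payStatus : Int) (out : Int) : Prop := out = getWorstPayStatus_alt payStatus
instance (payStatus : Int) (out : Int) : Decidable (Spec_getWorstPayStatus payStatus out) := by unfold Spec_getWorstPayStatus; infer_instance

-- ===== CLAIM (what is proved, stated in full; the proofs are below) =====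
def Claim_equal_getWorstPayStatus : Prop := ∀ (payStatus : Int), Dom_getWorstPayStatus payStatus → Spec_getWorstPayStatus payStatus (getWorstPayStatus payStatus)

-- ===== LEMMAS AND PROOFS =====

theorem pvBand3_bounds (p : Int) (h : 0 < p) :
    0 ≤ PySem.Int.band p 3 ∧ PySem.Int.band p 3 < 4 := by
  have e : PySem.Int.band p 3 = ((p.toNat &&& 3 : Nat) : Int) :=
    PySem.Int.band_of_nonneg (by omega) (by omega)
  have hlt : p.toNat &&& 3 < 2 ^ 2 := Nat.and_lt_two_pow _ (by norm_num)
  rw [e]; constructor <;> omega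

-- adding one status x ∈ [0,4) to the set changes pvPick exactly like B's running-best update
theorem pvPick_add (s : PySem.Set Int) (x : Int) (hx0 : 0 ≤ x) (hx4 : x < 4) :
    pvPick (PySem.Set.add s x) = if pvRank x < pvRank (pvPick s) then x else pvPick s := by
  interval_cases x <;>
    · by_cases h1 : (1:Int) ∈ s <;>
        by_cases h3 : (3:Int) ∈ s <;>
          by_cases h2 : (2:Int) ∈ s <;>
            by_cases h0 : (0:Int) ∈ s <;>
              simp [pvPick, PySem.Set.add, PySem.Set.contains, pvRank, h1, h3, h2, h0]

-- main invariant: picking from the collected set equals threading the best through the loop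
theorem pvCollect_pick (p : Int) (s : PySem.Set Int) :
    pvPick (pvCollect p s) = pvLoopB p (pvPick s) := by
  fun_induction pvCollect p s with
  | case1 p s h ih =>
    rw [ih, pvPick_add s _ (pvBand3_bounds p h).1 (pvBand3_bounds p h).2]
    conv_rhs => rw [pvLoopB]
    simp [h]
  | case2 p s h =>
    rw [pvLoopB]
    simp only [h, dite_false]

-- ===== VERDICT (by name: the statement is the Claim_ definition above) =====
theorem getWorstPayStatus_spec : Claim_equal_getWorstPayStatus := by
  intro payStatus _
  unfold Spec_getWorstPayStatus getWorstPayStatus getWorstPayStatus_alt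
  have := pvCollect_pick payStatus (PySem.Set.ofList [0])
  rw [this]
  norm_num [pvPick, PySem.Set.ofList, PySem.Set.add, PySem.Set.contains, PySem.Set.empty]
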